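-- pv_equiv track=rewrite | github.com/ChristopherLloyd/ChristopherLloyd.github.io | works/experinfo/2014_TIPE/toutPythonOrdresSn.py | majOrdre
-- ===== SOURCE A (Python) =====
-- def listprime(n):
--     if n<2:
--         return([])
--     else:
--         L=[2]
--         k=3
--         while len(L)<n:
--             for d in L:
--                 if k%d==0:
--                     break
--                 if d==L[-1]:
--                     L.append(k)
--             k+=2
--         return(L)
--
-- def majOrdre(n): # détermination empirique de l'ordre maximal des éléments de Sn (pour taille du tableau)
--     if n<=4:
--         return(n)
--     L=listprime(n)
--     maj=1
--     s=0
--     k=0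
--     for k in L:
--         if s+k==n:
--             return(maj*k*3)
--         elif s+k<n:
--             maj=maj*k
--             s+=k
--         else:
--             return(maj*(n-s)*3)
-- ===== SOURCE B (Python) =====
-- # B: generate primes on demand by sqrt-bounded trial division, stopping as soon as
-- # the cumulative prime sum reaches n, instead of precomputing the first n primes.
--
-- def _is_odd_prime(c):
--     d = 3
--     while d * d <= c:
--         if c % d == 0:
--             return False
--         d += 2
--     return True
--
-- def _next_odd_prime(k):
--     c = k + 2
--     while not _is_odd_prime(c):
--         c += 2
--     return c
--
-- def majOrdre(n):
--     if n <= 4: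
--         return n
--     maj = 1
--     s = 0
--     k = 2
--     while s + k < n:
--         maj *= k
--         s += k
--         k = 3 if k == 2 else _next_odd_prime(k)
--     if s + k == n:
--         return maj * k * 3
--     return maj * (n - s) * 3
-- ===== Notes on version B (the rewrite author's own statement) =====
-- stated objective: faster
-- what changed: A precomputes the first n primes, trial-dividing each odd candidate by all previously found primes, then greedily folds over that list; B interleaves the greedy accumulation with on-demand generation of the next prime via sqrt-bounded trial division, stopping as soon as the cumulative prime sum reaches n, so only the ~sqrt(n log n) primes actually consumed are ever generated.
import Mathlib
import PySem

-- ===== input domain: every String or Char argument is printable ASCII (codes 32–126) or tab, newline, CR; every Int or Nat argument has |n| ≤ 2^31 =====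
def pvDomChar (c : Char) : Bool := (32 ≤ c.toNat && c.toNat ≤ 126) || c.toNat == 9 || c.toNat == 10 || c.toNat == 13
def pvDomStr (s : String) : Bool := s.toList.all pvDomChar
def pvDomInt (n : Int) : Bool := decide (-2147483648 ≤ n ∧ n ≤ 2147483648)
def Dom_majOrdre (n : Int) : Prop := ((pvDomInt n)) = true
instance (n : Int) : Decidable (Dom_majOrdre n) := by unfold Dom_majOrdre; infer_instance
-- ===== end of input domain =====

-- B replaces A's precomputation of the first n primes (each odd candidate trial-divided by
-- ALL previously found primes) by on-demand generation of the next prime with sqrt-bounded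
-- trial division, stopping as soon as the cumulative prime sum reaches n; objective: faster.
-- Unbounded Python while-loops are ported with explicit fuel; each fuel is proven sufficient
-- in the lemmas below (lpGo_eq / listprime_eq, isOddGo_iff, nextOddPrime_nth, greedy_eq).

-- ===== PORT A =====

-- Python's live-list inner loop 'for d in L: if k%d==0: break; if d==L[-1]: L.append(k)',
-- iterated by index over the current (possibly grown) list; fuel L.length+2 always suffices
-- (at most one append can happen, after which d = k and k%k==0 breaks).
def innerGo (k : Nat) : Nat → List Nat → Nat → List Nat
  | 0, cur, _ => cur
  | f + 1, cur, i =>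
    match cur[i]? with
    | none => cur
    | some d =>
      if k % d = 0 then cur
      else if d = cur.getLastD 0 then innerGo k f (cur ++ [k]) (i + 1)
      else innerGo k f cur (i + 1)

def innerLoop (k : Nat) (L : List Nat) : List Nat := innerGo k (L.length + 2) L 0

-- Python's 'while len(L)<n: <inner loop>; k+=2'; fuel 2^n suffices because the loop stops
-- once k passes the n-th prime, which is at most 2^(n+1) (proved in nth_prime_le_pow below);
-- fuel 0 returns the current list — unreachable in use
def lpGo : Nat → Nat → List Nat → Nat → List Nat
  | 0, _, L, _ => L
  | f + 1, n, L, k => if L.length < n then lpGo f n (innerLoop k L) (k + 2) else L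

def listprime (m : Nat) : List Nat :=
  if m < 2 then [] else lpGo (2 ^ m) m [2] 3

-- Python's 'for k in L: …' loop of majOrdre; on [] the Python loop would fall through and
-- return None — unreachable for the m ≥ 5 this is called with (0 is an arbitrary filler)
def foldA (m : Nat) (maj s : Nat) : List Nat → Nat
  | [] => 0
  | k :: rest =>
    if s + k = m then maj * k * 3
    else if s + k < m then foldA m (maj * k) (s + k) rest
    else maj * (m - s) * 3

def majOrdre (n : Int) : Int :=
  if n ≤ 4 then n else Int.ofNat (foldA n.toNat 1 0 (listprime n.toNat))

-- ===== PORT B =====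

-- '_is_odd_prime': trial division of c by odd d = 3, 5, … while d*d ≤ c; fuel c+1 suffices
-- (d only grows, and the loop stops once d exceeds c); fuel 0 ⇒ true, unreachable in use
def isOddGo (c : Nat) : Nat → Nat → Bool
  | 0, _ => true
  | f + 1, d => if d * d ≤ c then (if c % d = 0 then false else isOddGo c f (d + 2)) else true

def isOddPrime (c : Nat) : Bool := isOddGo c (c + 1) 3

-- '_next_odd_prime': scan odd candidates after k; fuel k suffices (Bertrand: there is a
-- prime in (k, 2k]); fuel 0 returns the current candidate — unreachable in use
def nextGo (c : Nat) : Nat → Nat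
  | 0 => c
  | f + 1 => if isOddPrime c then c else nextGo (c + 2) f

def nextOddPrime (k : Nat) : Nat := nextGo (k + 2) k

-- Python's 'while s + k < n: maj *= k; s += k; k = 3 if k == 2 else _next_odd_prime(k)';
-- fuel m suffices since s grows by k ≥ 2 per iteration; fuel 0 ⇒ 0, unreachable in use
def bGo : Nat → Nat → Nat → Nat → Nat → Nat
  | 0, _, _, _, _ => 0
  | f + 1, m, maj, s, k =>
    if s + k < m then bGo f m (maj * k) (s + k) (if k = 2 then 3 else nextOddPrime k)
    else if s + k = m then maj * k * 3
    else maj * (m - s) * 3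

def majOrdre_alt (n : Int) : Int :=
  if n ≤ 4 then n else Int.ofNat (bGo n.toNat n.toNat 1 0 2)

-- ===== PRECONDITION & SPEC =====
def Spec_majOrdre (n : Int) (out : Int) : Prop := out = majOrdre_alt n
instance (n : Int) (out : Int) : Decidable (Spec_majOrdre n out) := by unfold Spec_majOrdre; infer_instance

-- ===== CLAIM (what is proved, stated in full; the proofs are below) =====
def Claim_equal_majOrdre : Prop := ∀ (n : Int), Dom_majOrdre n → Spec_majOrdre n (majOrdre n)

-- ===== LEMMAS AND PROOFS =====

-- the increasing list of primes below m: the loop invariant of A's listprime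
def pl (m : Nat) : List Nat := (List.range m).filter (fun x => decide (Nat.Prime x))

theorem pl_mem (m d : Nat) : d ∈ pl m ↔ d < m ∧ d.Prime := by
  simp [pl, List.mem_filter]

theorem pl_nodup (m : Nat) : (pl m).Nodup := List.Nodup.filter _ (List.nodup_range)

theorem pl_succ (m : Nat) :
    pl (m + 1) = pl m ++ if m.Prime then [m] else [] := by
  rw [pl, List.range_succ, List.filter_append]
  split <;> simp_all [pl, List.filter]

theorem pl_two_step (k : Nat) (hk2 : k % 2 = 1) (hk3 : 3 ≤ k) :
    pl (k + 2) = pl k ++ if k.Prime then [k] else [] := by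
  have h1 : ¬ (k+1).Prime := by
    intro h
    have := h.even_iff.mp ⟨(k+1)/2, by omega⟩
    omega
  have e2 : pl (k+2) = pl (k+1) ++ if (k+1).Prime then [k+1] else [] := pl_succ (k+1)
  have e1 : pl (k+1) = pl k ++ if k.Prime then [k] else [] := pl_succ k
  rw [e2, e1, if_neg h1]
  simp

theorem pl_len_succ_succ (k : Nat) (hk2 : k % 2 = 1) (hk3 : 3 ≤ k) :
    (pl (k + 2)).length ≤ (pl k).length + 1 := by
  rw [pl_two_step k hk2 hk3]
  split <;> simp

theorem pl_length_count (m : Nat) : (pl m).length = Nat.count Nat.Prime m := by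
  simp [pl, Nat.count, List.countP_eq_length_filter]

theorem le_nth_of_count_lt (k n : Nat) (h : Nat.count Nat.Prime k < n) :
    k ≤ Nat.nth Nat.Prime n := by
  by_contra hlt
  have h2 : Nat.nth Nat.Prime n + 1 ≤ k := by omega
  have := Nat.count_monotone (p := Nat.Prime) h2
  rw [Nat.count_nth_succ_of_infinite Nat.infinite_setOf_prime] at this
  omega

theorem no_div_iff_prime (k : Nat) (hk2 : k % 2 = 1) (hk3 : 3 ≤ k) :
    ((pl k).all fun d => !(k % d == 0)) = true ↔ k.Prime := by
  rw [List.all_eq_true]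
  constructor
  · intro h
    by_contra hnp
    have hmf : (Nat.minFac k).Prime := Nat.minFac_prime (by omega)
    have hdvd : Nat.minFac k ∣ k := Nat.minFac_dvd k
    have hlt : Nat.minFac k < k := (Nat.not_prime_iff_minFac_lt (by omega)).mp hnp
    have hmem : Nat.minFac k ∈ pl k := (pl_mem k _).mpr ⟨hlt, hmf⟩
    have := h _ hmem
    simp at this
    exact this (Nat.mod_eq_zero_of_dvd hdvd)
  · intro hp d hd
    obtain ⟨hlt, hdp⟩ := (pl_mem k d).mp hd
    simp only [Bool.not_eq_eq_eq_not, Bool.not_true, beq_eq_false_iff_ne, ne_eq]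
    intro h0
    have hdvd : d ∣ k := Nat.dvd_of_mod_eq_zero h0
    rcases (Nat.Prime.eq_one_or_self_of_dvd hp d hdvd) with h | h
    · exact absurd h hdp.one_lt.ne'
    · omega

theorem getLastD_eq_getElem (L : List Nat) (h : 0 < L.length) :
    L.getLastD 0 = L[L.length - 1]'(by omega) := by
  rw [List.getLastD_eq_getLast?, List.getLast?_eq_getElem?]
  simp [List.getElem?_eq_getElem (by omega : L.length - 1 < L.length)]

theorem innerGo_go (k : Nat) (L : List Nat) (hnd : L.Nodup) :
    ∀ f i, i < L.length → L.length + 2 ≤ i + f →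
      innerGo k f L i =
        if (L.drop i).all (fun d => !(k % d == 0)) then L ++ [k] else L := by
  intro f
  induction f with
  | zero => intro i hi hf; omega
  | succ f ih =>
    intro i hi hf
    rw [innerGo, List.getElem?_eq_getElem hi]
    simp only
    have hdrop : L.drop i = L[i] :: L.drop (i + 1) := List.drop_eq_getElem_cons hi
    by_cases hmod : k % L[i] = 0
    · rw [if_pos hmod]
      have hall : ((L.drop i).all fun d => !(k % d == 0)) = false := by
        refine List.all_eq_false.mpr ⟨L[i], ?_, ?_⟩
        · rw [hdrop]; exact List.mem_cons_self
        · simp [hmod]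
      rw [hall]
      simp
    · rw [if_neg hmod]
      by_cases hlast : i = L.length - 1
      · have hgl : L[i] = L.getLastD 0 := by
          rw [getLastD_eq_getElem L (by omega)]
          try simp only [hlast]
        rw [if_pos hgl]
        obtain ⟨f', rfl⟩ : ∃ f', f = f' + 1 := ⟨f - 1, by omega⟩
        rw [innerGo]
        have hidx : (L ++ [k])[i + 1]? = some k := by
          have : i + 1 = L.length := by omega
          rw [this]
          exact List.getElem?_concat_length
        rw [hidx]
        simp only [Nat.mod_self, if_pos]
        have hde : L.drop (i + 1) = [] := by
          apply List.drop_eq_nil_of_le; omega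
        rw [hdrop, hde]
        simp [hmod]
      · have hne : ¬ L[i] = L.getLastD 0 := by
          rw [getLastD_eq_getElem L (by omega)]
          intro hcontra
          have := (List.Nodup.getElem_inj_iff hnd).mp hcontra
          omega
        rw [if_neg hne]
        rw [ih (i + 1) (by omega) (by omega)]
        have hiff : ((L.drop i).all fun d => !(k % d == 0))
            = ((L.drop (i + 1)).all fun d => !(k % d == 0)) := by
          rw [hdrop, List.all_cons]
          have hb : (!(k % L[i] == 0)) = true := by simp [hmod]
          rw [hb, Bool.true_and]
        rw [hiff]

theorem pl_ne_nil (k : Nat) (hk3 : 3 ≤ k) : 0 < (pl k).length := by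
  have : (2 : Nat) ∈ pl k := (pl_mem k 2).mpr ⟨by omega, Nat.prime_two⟩
  exact List.length_pos_of_mem this

theorem inner_pl (k : Nat) (hk2 : k % 2 = 1) (hk3 : 3 ≤ k) :
    innerLoop k (pl k) = pl (k + 2) := by
  rw [innerLoop, innerGo_go k (pl k) (pl_nodup k) _ 0 (pl_ne_nil k hk3) (by omega)]
  rw [List.drop_zero, pl_two_step k hk2 hk3]
  by_cases hp : k.Prime
  · rw [if_pos ((no_div_iff_prime k hk2 hk3).mpr hp), if_pos hp]
  · rw [if_neg (fun h => hp ((no_div_iff_prime k hk2 hk3).mp h)), if_neg hp]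
    simp

theorem lpGo_eq (n : Nat) :
    ∀ f (L : List Nat) (k : Nat), L = pl k → k % 2 = 1 → 3 ≤ k → L.length ≤ n →
      Nat.nth Nat.Prime n + 2 ≤ k + 2 * f →
      ∃ K, lpGo f n L k = pl K ∧ (pl K).length = n := by
  intro f
  induction f with
  | zero =>
    intro L k hL hk2 hk3 hlen hfuel
    subst hL
    refine ⟨k, rfl, ?_⟩
    by_contra hne
    have hc : Nat.count Nat.Prime k < n := by
      have := pl_length_count k
      omega
    have := le_nth_of_count_lt k n hc
    omega
  | succ f ih =>
    intro L k hL hk2 hk3 hlen hfuel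
    rw [lpGo]
    by_cases h : L.length < n
    · rw [if_pos h]
      refine ih (innerLoop k L) (k + 2) ?_ (by omega) (by omega) ?_ (by omega)
      · rw [hL]; exact inner_pl k hk2 hk3
      · rw [hL, inner_pl k hk2 hk3]
        have := pl_len_succ_succ k hk2 hk3
        have h1 : (pl k).length < n := hL ▸ h
        omega
    · rw [if_neg h]
      refine ⟨k, hL, ?_⟩
      rw [← hL]
      omega

theorem gap_not_prime (i e : Nat) (h1 : Nat.nth Nat.Prime i < e)
    (h2 : e < Nat.nth Nat.Prime (i + 1)) : ¬ e.Prime := by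
  intro hp
  have he : Nat.nth Nat.Prime (Nat.count Nat.Prime e) = e := Nat.nth_count hp
  rw [← he] at h1 h2
  have hij : i < Nat.count Nat.Prime e := (Nat.nth_lt_nth Nat.infinite_setOf_prime).mp h1
  have hji : Nat.count Nat.Prime e < i + 1 := (Nat.nth_lt_nth Nat.infinite_setOf_prime).mp h2
  omega

theorem nth_succ_le_of_prime_gt (i p : Nat) (hp : p.Prime) (h : Nat.nth Nat.Prime i < p) :
    Nat.nth Nat.Prime (i + 1) ≤ p := by
  by_contra hlt
  exact gap_not_prime i p h (by omega) hp

theorem nth_prime_le_pow (i : Nat) : Nat.nth Nat.Prime i ≤ 2 ^ (i + 1) := by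
  induction i with
  | zero => rw [Nat.nth_prime_zero_eq_two]; omega
  | succ i ih =>
    have h2 : 2 ≤ Nat.nth Nat.Prime i := (Nat.prime_nth_prime i).two_le
    obtain ⟨p, hpp, hp1, hp2⟩ :=
      Nat.exists_prime_lt_and_le_two_mul (Nat.nth Nat.Prime i) (by omega)
    have hle : Nat.nth Nat.Prime (i + 1) ≤ p := nth_succ_le_of_prime_gt i p hpp hp1
    calc Nat.nth Nat.Prime (i + 1) ≤ p := hle
      _ ≤ 2 * Nat.nth Nat.Prime i := hp2
      _ ≤ 2 * 2 ^ (i + 1) := by omega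
      _ = 2 ^ (i + 2) := by ring

theorem pl_eq_map_nth (m : Nat) :
    pl m = (List.range (Nat.count Nat.Prime m)).map (Nat.nth Nat.Prime) := by
  induction m with
  | zero => simp [pl]
  | succ m ih =>
    rw [pl_succ, Nat.count_succ, ih]
    by_cases hp : m.Prime
    · rw [if_pos hp, if_pos hp, List.range_succ, List.map_append]
      simp [Nat.nth_count hp]
    · rw [if_neg hp, if_neg hp]
      simp

theorem pl_three : pl 3 = [2] := by decide

theorem listprime_eq (m : Nat) (hm : 2 ≤ m) :
    listprime m = (List.range m).map (Nat.nth Nat.Prime) := by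
  rw [listprime, if_neg (by omega)]
  have hfuel : Nat.nth Nat.Prime m + 2 ≤ 3 + 2 * 2 ^ m := by
    have := nth_prime_le_pow m
    have : 2 ^ (m + 1) = 2 * 2 ^ m := by ring
    omega
  obtain ⟨K, hK, hlen⟩ :=
    lpGo_eq m (2 ^ m) [2] 3 pl_three.symm rfl (le_refl 3) (by simp; omega) hfuel
  rw [hK, pl_eq_map_nth]
  rw [pl_length_count] at hlen
  rw [hlen]

theorem isOddGo_iff (c : Nat) :
    ∀ fuel d, c + 1 - d ≤ fuel → 2 ≤ d →
      (isOddGo c fuel d = true ↔ ∀ e, d ≤ e → e % 2 = d % 2 → e * e ≤ c → ¬ e ∣ c) := by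
  intro fuel
  induction fuel with
  | zero =>
    intro d hf hd
    have hdc : c < d := by omega
    rw [isOddGo]
    simp only [true_iff]
    intro e he hp hee
    nlinarith
  | succ fuel ih =>
    intro d hf hd
    rw [isOddGo]
    by_cases hdd : d * d ≤ c
    · rw [if_pos hdd]
      have hdc : d ≤ c := le_trans (Nat.le_mul_of_pos_left d (by omega)) hdd
      by_cases hmod : c % d = 0
      · rw [if_pos hmod]
        constructor
        · intro h; exact absurd h (by simp)
        · intro h
          exact absurd (Nat.dvd_of_mod_eq_zero hmod) (h d le_rfl rfl hdd)
      · rw [if_neg hmod]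
        rw [ih (d + 2) (by omega) (by omega)]
        constructor
        · intro h e he hp hee hdvd
          rcases Nat.eq_or_lt_of_le he with rfl | hlt
          · exact hmod (Nat.mod_eq_zero_of_dvd hdvd)
          · exact h e (by omega) (by omega) hee hdvd
        · intro h e he hp hee
          exact h e (by omega) (by omega) hee
    · rw [if_neg hdd]
      simp only [true_iff]
      intro e he hp hee hdvd
      have : d * d ≤ e * e := Nat.mul_le_mul he he
      omega

theorem isOddPrime_iff (c : Nat) (hc2 : c % 2 = 1) (hc3 : 3 ≤ c) :
    isOddPrime c = true ↔ c.Prime := by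
  rw [isOddPrime, isOddGo_iff c (c + 1) 3 (by omega) (by omega)]
  constructor
  · intro h
    by_contra hnp
    have hmf : (Nat.minFac c).Prime := Nat.minFac_prime (by omega)
    have hdvd : Nat.minFac c ∣ c := Nat.minFac_dvd c
    have hsq : Nat.minFac c * Nat.minFac c ≤ c := by
      have := Nat.minFac_sq_le_self (by omega) hnp
      nlinarith [this]
    have hodd : Nat.minFac c % 2 = 1 := by
      rcases Nat.Prime.eq_two_or_odd hmf with h2 | h2
      · exfalso
        rw [h2] at hdvd
        omega
      · exact h2
    have h3 : 3 ≤ Nat.minFac c := by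
      have := hmf.two_le
      omega
    exact h _ h3 (by omega) hsq hdvd
  · intro hp e he hpar hee hdvd
    rcases hp.eq_one_or_self_of_dvd e hdvd with h | h
    · omega
    · subst h; nlinarith

theorem nextGo_prime (p : Nat) (hpp : isOddPrime p = true) :
    ∀ f c, c % 2 = 1 → 3 ≤ c → c ≤ p → p % 2 = 1 → (p - c) / 2 < f →
      (∀ e, c ≤ e → e < p → e % 2 = 1 → isOddPrime e = false) → nextGo c f = p := by
  intro f
  induction f with
  | zero => omega
  | succ f ih =>
    intro c hc2 hc3 hcp hp2 hfuel hgap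
    rw [nextGo]
    rcases Nat.eq_or_lt_of_le hcp with rfl | hlt
    · rw [if_pos hpp]
    · rw [if_neg (by simp [hgap c le_rfl hlt hc2])]
      exact ih (c + 2) (by omega) (by omega) (by omega) hp2 (by omega)
        (fun e he hep he2 => hgap e (by omega) hep he2)

theorem nth_prime_ge (i : Nat) (hi : 1 ≤ i) : 3 ≤ Nat.nth Nat.Prime i := by
  have h1 : Nat.nth Nat.Prime 0 < Nat.nth Nat.Prime i :=
    (Nat.nth_lt_nth Nat.infinite_setOf_prime).mpr (by omega)
  rw [Nat.nth_prime_zero_eq_two] at h1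
  omega

theorem nth_prime_odd (i : Nat) (hi : 1 ≤ i) : Nat.nth Nat.Prime i % 2 = 1 := by
  have hp := Nat.prime_nth_prime i
  have h3 := nth_prime_ge i hi
  rcases hp.eq_two_or_odd with h | h
  · omega
  · exact h

theorem nextOddPrime_nth (i : Nat) (hi : 1 ≤ i) :
    nextOddPrime (Nat.nth Nat.Prime i) = Nat.nth Nat.Prime (i + 1) := by
  have hk3 := nth_prime_ge i hi
  have hk2 := nth_prime_odd i hi
  have hs3 : 3 ≤ Nat.nth Nat.Prime (i + 1) := nth_prime_ge (i + 1) (by omega)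
  have hs2 : Nat.nth Nat.Prime (i + 1) % 2 = 1 := nth_prime_odd (i + 1) (by omega)
  have hlt : Nat.nth Nat.Prime i < Nat.nth Nat.Prime (i + 1) :=
    (Nat.nth_lt_nth Nat.infinite_setOf_prime).mpr (by omega)
  obtain ⟨p, hpp, hp1, hp2⟩ :=
    Nat.exists_prime_lt_and_le_two_mul (Nat.nth Nat.Prime i) (by omega)
  have hbound : Nat.nth Nat.Prime (i + 1) ≤ 2 * Nat.nth Nat.Prime i :=
    le_trans (nth_succ_le_of_prime_gt i p hpp hp1) hp2
  rw [nextOddPrime]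
  apply nextGo_prime
  · exact (isOddPrime_iff _ hs2 hs3).mpr (Nat.prime_nth_prime (i + 1))
  · omega
  · omega
  · omega
  · exact hs2
  · omega
  · intro e he hep he2
    rw [← Bool.not_eq_true]
    intro hpe
    have hprime := (isOddPrime_iff e he2 (by omega)).mp hpe
    exact gap_not_prime i e (by omega) hep hprime

theorem greedy_eq (m : Nat) :
    ∀ len i maj s fuel, 1 ≤ i → s < m → m ≤ s + 2 * len → m - s ≤ fuel →
      foldA m maj s ((List.range' i len).map (Nat.nth Nat.Prime)) =
        bGo fuel m maj s (Nat.nth Nat.Prime i) := by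
  intro len
  induction len with
  | zero => intro i maj s fuel hi hs hlen; omega
  | succ len ih =>
    intro i maj s fuel hi hs hlen hfuel
    have hq2 : 2 ≤ Nat.nth Nat.Prime i := (Nat.prime_nth_prime i).two_le
    have hq3 : 3 ≤ Nat.nth Nat.Prime i := nth_prime_ge i hi
    obtain ⟨f, rfl⟩ : ∃ f, fuel = f + 1 := ⟨fuel - 1, by omega⟩
    rw [List.range'_succ, List.map_cons, foldA, bGo]
    by_cases he : s + Nat.nth Nat.Prime i = m
    · rw [if_pos he, if_neg (by omega), if_pos he]
    · rw [if_neg he]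
      by_cases hlt : s + Nat.nth Nat.Prime i < m
      · rw [if_pos hlt, if_pos hlt]
        rw [ih (i + 1) (maj * Nat.nth Nat.Prime i) (s + Nat.nth Nat.Prime i) f
          (by omega) hlt (by omega) (by omega)]
        rw [if_neg (by omega), nextOddPrime_nth i hi]
      · rw [if_neg hlt, if_neg hlt, if_neg he]

theorem nth_prime_one : Nat.nth Nat.Prime 1 = 3 := by
  have h := Nat.nth_count (p := Nat.Prime) (n := 3) (by norm_num)
  have hc : Nat.count Nat.Prime 3 = 1 := by decide
  rw [hc] at h
  exact h

theorem majOrdre_eq_alt (n : Int) : majOrdre n = majOrdre_alt n := by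
  rw [majOrdre, majOrdre_alt]
  by_cases h4 : n ≤ 4
  · rw [if_pos h4, if_pos h4]
  · rw [if_neg h4, if_neg h4]
    have hm : 5 ≤ n.toNat := by omega
    congr 1
    rw [listprime_eq n.toNat (by omega)]
    rw [List.range_eq_range']
    obtain ⟨m', hm'⟩ : ∃ m', n.toNat = m' + 1 := ⟨n.toNat - 1, by omega⟩
    rw [hm']
    obtain ⟨f, hf⟩ : ∃ f, m' + 1 = f + 1 := ⟨m', rfl⟩
    rw [List.range'_succ, List.map_cons, foldA, hf, bGo]
    rw [Nat.nth_prime_zero_eq_two]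
    rw [if_neg (by omega), if_pos (by omega), if_pos (by omega)]
    rw [greedy_eq (f + 1) m' 1 (1 * 2) (0 + 2) f
      (by omega) (by omega) (by omega) (by omega)]
    rw [if_pos rfl, nth_prime_one]

-- ===== VERDICT (by name: the statement is the Claim_ definition above) =====
theorem majOrdre_spec : Claim_equal_majOrdre := by
  intro n _
  unfold Spec_majOrdre
  exact majOrdre_eq_alt n
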